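-- pv_equiv track=rewrite | github.com/Chandana-Pingili/Placement_Training | kthlargestfactor.py | kthLargestFactor
-- ===== SOURCE A (Python) =====
-- def kthLargestFactor(num,k):
--     factor=num
--     for i in range(num,0,-1):
--         if num%i==0:
--             factor=i
--             k-=1
--             if k==0:
--                 return factor
-- ===== SOURCE B (Python) =====
-- def kthLargestFactor(num, k):
--     if num < 1 or k < 1:
--         return None
--     small = []
--     large = []
--     i = 1
--     while i * i <= num:
--         if num % i == 0:
--             small.append(i)
--             if i * i != num:
--                 large.append(num // i)
--         i += 1
--     divs = large + small[::-1]
--     if k <= len(divs):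
--         return divs[k - 1]
--     return None
-- ===== Notes on version B (the rewrite author's own statement) =====
-- stated objective: faster
-- what changed: Replaces the O(num) countdown scan over every integer from num to 1 with divisor-pair enumeration up to sqrt(num): each divisor i <= sqrt(num) yields its cofactor num//i, and the kth largest is read off from the concatenated descending list.
import Mathlib
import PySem

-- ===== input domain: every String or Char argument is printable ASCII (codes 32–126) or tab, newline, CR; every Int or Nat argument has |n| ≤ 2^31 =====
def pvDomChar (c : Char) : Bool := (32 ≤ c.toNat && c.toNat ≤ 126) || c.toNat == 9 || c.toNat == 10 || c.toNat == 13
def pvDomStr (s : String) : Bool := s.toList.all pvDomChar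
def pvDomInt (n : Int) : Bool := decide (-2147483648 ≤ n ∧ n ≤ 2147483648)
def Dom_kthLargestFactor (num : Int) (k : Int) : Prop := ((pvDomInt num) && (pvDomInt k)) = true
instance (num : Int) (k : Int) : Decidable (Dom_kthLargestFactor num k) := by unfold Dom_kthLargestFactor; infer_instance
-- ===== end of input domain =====

set_option maxRecDepth 4000


-- B replaces A's O(num) countdown scan with divisor-pair enumeration up to sqrt(num) (objective: faster).

-- ===== PORT A =====
-- A's countdown loop: i runs over range(num, 0, -1); state = (factor, k); early return when k hits 0.
def kthLargestFactorLoop (num : Int) : List Int → Int → Int → Option Int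
  | [], _, _ => none
  | i :: rest, factor, k =>
    if PySem.Int.mod num i == 0 then
      if k - 1 == 0 then some i
      else kthLargestFactorLoop num rest i (k - 1)
    else kthLargestFactorLoop num rest factor k

def kthLargestFactor (num : Int) (k : Int) : Option Int :=
  kthLargestFactorLoop num (PySem.List.pyRange num 0 (-1)) num k

-- ===== PORT B =====
-- B's while loop: i from 1 while i*i <= num, collecting small divisors and their cofactors.
-- (the '1 ≤ i' conjunct in the guard is a totality guard: B always starts at i = 1 and only increments)
def kthLargestFactorCollect (num : Int) (i : Int) (small : List Int) (large : List Int) :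
    List Int × List Int :=
  if h : i * i ≤ num ∧ 1 ≤ i then
    if PySem.Int.mod num i == 0 then
      kthLargestFactorCollect num (i + 1) (small ++ [i])
        (if i * i ≠ num then large ++ [PySem.Int.floordiv num i] else large)
    else
      kthLargestFactorCollect num (i + 1) small large
  else (small, large)
termination_by (num + 1 - i).toNat
decreasing_by
  all_goals
    have hle : i ≤ i * i := le_mul_of_one_le_left (by omega) h.2
    omega
  
def kthLargestFactor_alt (num : Int) (k : Int) : Option Int :=
  if num < 1 ∨ k < 1 then none
  else
    let p := kthLargestFactorCollect num 1 [] []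
    let divs := p.2 ++ p.1.reverse
    if k ≤ (divs.length : Int) then PySem.List.pyGet? divs (k - 1) else none

-- ===== PRECONDITION & SPEC =====
def Spec_kthLargestFactor (num : Int) (k : Int) (out : Option Int) : Prop := out = kthLargestFactor_alt num k
instance (num : Int) (k : Int) (out : Option Int) : Decidable (Spec_kthLargestFactor num k out) := by unfold Spec_kthLargestFactor; infer_instance

-- ===== CLAIM (what is proved, stated in full; the proofs are below) =====
def Claim_equal_kthLargestFactor : Prop := ∀ (num : Int) (k : Int), Dom_kthLargestFactor num k → Spec_kthLargestFactor num k (kthLargestFactor num k)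

-- ===== LEMMAS AND PROOFS =====

-- the descending divisor list A effectively scans
def descDivs (num : Int) : List Int :=
  (PySem.List.pyRange num 0 (-1)).filter (fun i => PySem.Int.mod num i == 0)

-- spec lists for B's collector
def smallDivs (num i : Int) : List Int :=
  (PySem.List.pyRange i (num + 1) 1).filter (fun j => decide (j * j ≤ num) && (PySem.Int.mod num j == 0))

def largeDivs (num i : Int) : List Int :=
  ((smallDivs num i).filter (fun j => j * j != num)).map (fun j => PySem.Int.floordiv num j)

-- A's loop returns the (k-1)-th element of the scanned divisor list (1-indexed), none otherwise
theorem loopA_spec (num : Int) : ∀ (l : List Int) (factor k : Int),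
    kthLargestFactorLoop num l factor k =
      if 1 ≤ k then (l.filter (fun i => PySem.Int.mod num i == 0))[(k - 1).toNat]? else none := by
  intro l
  induction l with
  | nil => intro factor k; simp [kthLargestFactorLoop]
  | cons i rest ih =>
    intro factor k
    by_cases hp : (PySem.Int.mod num i == 0) = true
    · rcases lt_trichotomy k 1 with hk | hk | hk
      · have h3 : (k - 1 == 0) = false := by simp; omega
        rw [kthLargestFactorLoop, ih]
        simp only [hp, h3, if_true, Bool.false_eq_true, if_false,
          if_neg (show ¬ (1 ≤ k) by omega), if_neg (show ¬ (1 ≤ k - 1) by omega)]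
      · subst hk
        have h0 : ((1:Int) - 1 == 0) = true := by decide
        rw [kthLargestFactorLoop]
        simp only [hp, h0, if_true, List.filter_cons]
        norm_num
      · have h3 : (k - 1 == 0) = false := by simp; omega
        have h4 : (k - 1).toNat = (k - 1 - 1).toNat + 1 := by omega
        rw [kthLargestFactorLoop, ih]
        simp only [hp, h3, List.filter_cons, if_true, if_false, Bool.false_eq_true,
          if_pos (show (1:Int) ≤ k - 1 by omega), if_pos (show (1:Int) ≤ k by omega), h4,
          List.getElem?_cons_succ]
    · have hp' : (PySem.Int.mod num i == 0) = false := by simpa using hp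
      rw [kthLargestFactorLoop]
      simp only [hp', Bool.false_eq_true, if_false]
      rw [ih]
      simp [hp']

-- unfolding smallDivs / largeDivs one step inside the while region
theorem smallDivs_cons (num i : Int) (h1 : 1 ≤ i) (h2 : i * i ≤ num)
    (hp : (PySem.Int.mod num i == 0) = true) :
    smallDivs num i = i :: smallDivs num (i + 1) := by
  have hle : i ≤ i * i := le_mul_of_one_le_left (by omega) h1
  rw [smallDivs, PySem.List.pyRange_one_cons (by omega), List.filter_cons]
  simp [hp, h2, smallDivs]

theorem smallDivs_skip (num i : Int) (hp : (PySem.Int.mod num i == 0) = false) :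
    smallDivs num i = smallDivs num (i + 1) := by
  by_cases hlt : i < num + 1
  · rw [smallDivs, PySem.List.pyRange_one_cons hlt, List.filter_cons]
    simp [hp, smallDivs]
  · rw [smallDivs, smallDivs, PySem.List.pyRange_one_eq_nil (by omega),
      PySem.List.pyRange_one_eq_nil (by omega)]

theorem smallDivs_nil (num i : Int) (h1 : 1 ≤ i) (h2 : num < i * i) :
    smallDivs num i = [] := by
  rw [smallDivs, List.filter_eq_nil_iff]
  intro j hj
  have hj' := (PySem.List.mem_pyRange_one).1 hj
  have : i * i ≤ j * j := mul_le_mul hj'.1 hj'.1 (by omega) (by omega)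
  simp
  omega

theorem largeDivs_cons (num i : Int) (h1 : 1 ≤ i) (h2 : i * i ≤ num)
    (hp : (PySem.Int.mod num i == 0) = true) (hsq : i * i ≠ num) :
    largeDivs num i = PySem.Int.floordiv num i :: largeDivs num (i + 1) := by
  rw [largeDivs, smallDivs_cons num i h1 h2 hp, List.filter_cons]
  simp [hsq, largeDivs]

theorem largeDivs_sq (num i : Int) (h1 : 1 ≤ i) (h2 : i * i ≤ num)
    (hp : (PySem.Int.mod num i == 0) = true) (hsq : i * i = num) :
    largeDivs num i = largeDivs num (i + 1) := by
  rw [largeDivs, smallDivs_cons num i h1 h2 hp, List.filter_cons]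
  simp [hsq, largeDivs]

theorem collect_eq (num : Int) : ∀ (i : Int) (s l : List Int), 1 ≤ i →
    kthLargestFactorCollect num i s l = (s ++ smallDivs num i, l ++ largeDivs num i) := by
  intro i s l hi
  fun_induction kthLargestFactorCollect num i s l with
  | case1 i s l h hp ih =>
    have ih' := ih (by omega)
    rw [smallDivs_cons num i h.2 h.1 hp]
    split_ifs at ih' ⊢ with hsq
    · rw [ih', largeDivs_cons num i h.2 h.1 hp hsq]
      simp
    · rw [ih', largeDivs_sq num i h.2 h.1 hp (by omega)]
      simp
  | case2 i s l h hp ih =>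
    have hp' : (PySem.Int.mod num i == 0) = false := by simpa using hp
    have e : largeDivs num i = largeDivs num (i + 1) := by
      rw [largeDivs, largeDivs, smallDivs_skip num i hp']
    rw [ih (by omega), smallDivs_skip num i hp', e]
  | case3 i s l h =>
    have h2 : num < i * i := by
      by_contra hc
      exact h ⟨by omega, hi⟩
    rw [largeDivs, smallDivs_nil num i hi h2]
    simp

-- membership characterisations
theorem mem_smallDivs (num x : Int) :
    x ∈ smallDivs num 1 ↔ 1 ≤ x ∧ x * x ≤ num ∧ x ∣ num := by
  have hle : ∀ y : Int, 1 ≤ y → y ≤ y * y := fun y hy => le_mul_of_one_le_left (by omega) hy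
  simp only [smallDivs, List.mem_filter, PySem.List.mem_pyRange_one, Bool.and_eq_true,
    decide_eq_true_eq, beq_iff_eq, PySem.Int.mod_eq_zero_iff_dvd]
  constructor
  · rintro ⟨⟨h1, _⟩, h2, h3⟩
    exact ⟨h1, h2, h3⟩
  · rintro ⟨h1, h2, h3⟩
    exact ⟨⟨h1, by have := hle x h1; omega⟩, h2, h3⟩

theorem mem_largeDivs (num x : Int) :
    x ∈ largeDivs num 1 ↔
      ∃ j, (1 ≤ j ∧ j * j ≤ num ∧ j ∣ num) ∧ j * j ≠ num ∧ x = num / j := by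
  simp only [largeDivs, List.mem_map, List.mem_filter, mem_smallDivs, bne_iff_ne, ne_eq]
  constructor
  · rintro ⟨j, ⟨hj, hsq⟩, rfl⟩
    exact ⟨j, hj, hsq, by rw [PySem.Int.floordiv_eq_ediv_of_pos (by omega)]⟩
  · rintro ⟨j, hj, hsq, rfl⟩
    exact ⟨j, ⟨hj, hsq⟩, by rw [PySem.Int.floordiv_eq_ediv_of_pos (by omega)]⟩

theorem mem_descDivs (num x : Int) :
    x ∈ descDivs num ↔ 0 < x ∧ x ≤ num ∧ x ∣ num := by
  simp only [descDivs, List.mem_filter, PySem.List.mem_pyRange_neg_one, beq_iff_eq,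
    PySem.Int.mod_eq_zero_iff_dvd]
  tauto

-- arithmetic facts about divisor pairs (num ≥ 1, divisor j ≥ 1)
theorem cofactor_mul (num j : Int) (hj : j ∣ num) (_h1 : 1 ≤ j) : num / j * j = num :=
  Int.ediv_mul_cancel hj

theorem cofactor_pos (num j : Int) (hn : 1 ≤ num) (hj : j ∣ num) (h1 : 1 ≤ j) :
    1 ≤ num / j := by
  have hm := cofactor_mul num j hj h1
  nlinarith [hm]

theorem cofactor_dvd (num j : Int) (hj : j ∣ num) (h1 : 1 ≤ j) : num / j ∣ num :=
  ⟨j, (cofactor_mul num j hj h1).symm ▸ rfl⟩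

theorem cofactor_big (num j : Int) (hn : 1 ≤ num) (hj : j ∣ num) (h1 : 1 ≤ j)
    (h2 : j * j ≤ num) (h3 : j * j ≠ num) : num < num / j * (num / j) := by
  have hm := cofactor_mul num j hj h1
  have hq := cofactor_pos num j hn hj h1
  have hlt : j * j < num := lt_of_le_of_ne h2 h3
  have hjq : j < num / j := by nlinarith [hm, hlt, h1]
  nlinarith [hm, hjq, hq]

theorem cofactor_anti (num j1 j2 : Int) (hn : 1 ≤ num)
    (hj1 : j1 ∣ num) (h11 : 1 ≤ j1) (hj2 : j2 ∣ num) (h12 : 1 ≤ j2) (hlt : j1 < j2) :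
    num / j2 < num / j1 := by
  have hm1 := cofactor_mul num j1 hj1 h11
  have hm2 := cofactor_mul num j2 hj2 h12
  have hq1 := cofactor_pos num j1 hn hj1 h11
  have hq2 := cofactor_pos num j2 hn hj2 h12
  nlinarith [hm1, hm2, hq1, hq2]

-- every divisor above the square root is the cofactor of one below it
theorem big_divisor_is_cofactor (num x : Int) (hn : 1 ≤ num) (hx : x ∣ num) (h1 : 1 ≤ x)
    (h2 : num < x * x) :
    ∃ j, (1 ≤ j ∧ j * j ≤ num ∧ j ∣ num) ∧ j * j ≠ num ∧ x = num / j := by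
  refine ⟨num / x, ⟨cofactor_pos num x hn hx h1, ?_, cofactor_dvd num x hx h1⟩, ?_, ?_⟩
  · have hm := cofactor_mul num x hx h1
    have hq := cofactor_pos num x hn hx h1
    nlinarith [hm, hq]
  · have hm := cofactor_mul num x hx h1
    have hq := cofactor_pos num x hn hx h1
    nlinarith [hm, hq]
  · have hm := cofactor_mul num x hx h1
    have hq : num / x ≠ 0 := by have := cofactor_pos num x hn hx h1; omega
    calc x = num / x * x / (num / x) := by rw [Int.mul_ediv_cancel_left x hq]
    _ = num / (num / x) := by rw [hm]

-- sortedness of the three pieces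
theorem pairwise_smallDivs (num : Int) : (smallDivs num 1).Pairwise (· < ·) := by
  exact List.Pairwise.filter _ (PySem.List.pairwise_lt_pyRange_one 1 (num + 1))

theorem pairwise_descDivs (num : Int) : (descDivs num).Pairwise (fun a b => b < a) := by
  rw [descDivs, PySem.List.pyRange_neg_one_eq_reverse]
  refine List.Pairwise.filter _ ?_
  rw [List.pairwise_reverse]
  exact PySem.List.pairwise_lt_pyRange_one _ _

theorem pairwise_largeDivs (num : Int) (hn : 1 ≤ num) :
    (largeDivs num 1).Pairwise (fun a b => b < a) := by
  rw [largeDivs, List.pairwise_map]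
  refine List.Pairwise.imp_of_mem ?_ (List.Pairwise.filter _ (pairwise_smallDivs num))
  intro a b ha hb hab
  have ha' := (mem_smallDivs num a).1 (List.mem_of_mem_filter ha)
  have hb' := (mem_smallDivs num b).1 (List.mem_of_mem_filter hb)
  have := cofactor_anti num a b hn ha'.2.2 ha'.1 hb'.2.2 hb'.1 hab
  simpa [PySem.Int.floordiv_eq_ediv_of_pos (show (0:Int) < a by omega),
    PySem.Int.floordiv_eq_ediv_of_pos (show (0:Int) < b by omega)] using this

-- the crux: B's concatenated list is exactly A's descending divisor list
theorem divs_eq (num : Int) (h : 1 ≤ num) :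
    largeDivs num 1 ++ (smallDivs num 1).reverse = descDivs num := by
  have hsortB : (largeDivs num 1 ++ (smallDivs num 1).reverse).Pairwise (fun a b => b < a) := by
    rw [List.pairwise_append]
    refine ⟨pairwise_largeDivs num h, ?_, ?_⟩
    · rw [List.pairwise_reverse]
      exact (pairwise_smallDivs num).imp (fun hab => hab)
    · intro a ha b hb
      have ha' := (mem_largeDivs num a).1 ha
      have hb' := (mem_smallDivs num b).1 (List.mem_reverse.1 hb)
      rcases ha' with ⟨j, ⟨hj1, hjs, hjd⟩, hjne, rfl⟩
      have hbig := cofactor_big num j h hjd hj1 hjs hjne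
      have hq := cofactor_pos num j h hjd hj1
      nlinarith [hb'.2.1, hb'.1, hbig, hq]
  have hsortD := pairwise_descDivs num
  have hnodB : (largeDivs num 1 ++ (smallDivs num 1).reverse).Nodup :=
    hsortB.imp (fun hab => by omega)
  have hnodD : (descDivs num).Nodup := hsortD.imp (fun hab => by omega)
  have hmem : ∀ x, x ∈ largeDivs num 1 ++ (smallDivs num 1).reverse ↔ x ∈ descDivs num := by
    intro x
    rw [List.mem_append, List.mem_reverse, mem_smallDivs, mem_largeDivs, mem_descDivs]
    constructor
    · rintro (⟨j, ⟨hj1, hjs, hjd⟩, hjne, rfl⟩ | ⟨h1, h2, h3⟩)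
      · have hm := cofactor_mul num j hjd hj1
        have hq := cofactor_pos num j h hjd hj1
        refine ⟨by omega, ?_, cofactor_dvd num j hjd hj1⟩
        nlinarith [hm, hq]
      · have hle : x ≤ x * x := le_mul_of_one_le_left (by omega) h1
        exact ⟨by omega, by omega, h3⟩
    · rintro ⟨h1, h2, h3⟩
      by_cases hsq : x * x ≤ num
      · exact Or.inr ⟨by omega, hsq, h3⟩
      · exact Or.inl (big_divisor_is_cofactor num x h h3 (by omega) (by omega))
  exact ((List.perm_ext_iff_of_nodup hnodB hnodD).2 hmem).eq_of_pairwise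
    (fun a b _ _ hab hba => by omega) hsortB hsortD

-- ===== VERDICT (by name: the statement is the Claim_ definition above) =====
theorem kthLargestFactor_spec : Claim_equal_kthLargestFactor := by
  intro num k _
  unfold Spec_kthLargestFactor kthLargestFactor kthLargestFactor_alt
  rw [loopA_spec]
  have hd : descDivs num =
      (PySem.List.pyRange num 0 (-1)).filter (fun i => PySem.Int.mod num i == 0) := rfl
  rw [← hd]
  by_cases hn : num < 1
  · rw [descDivs, PySem.List.pyRange_neg_one_eq_nil (by omega)]
    simp [hn]
  · by_cases hk : k < 1
    · simp [hk, show ¬ (1:Int) ≤ k by omega]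
    · have h1 : (1:Int) ≤ num := by omega
      have hcoll := collect_eq num 1 [] [] (by omega)
      simp only [hn, hk, or_self, if_false, hcoll, List.nil_append]
      rw [divs_eq num h1, if_pos (show (1:Int) ≤ k by omega)]
      by_cases hlen : k ≤ ((descDivs num).length : Int)
      · rw [if_pos hlen, PySem.List.pyGet?_of_nonneg (descDivs num) (show (0:Int) ≤ k - 1 by omega)]
      · rw [if_neg hlen, List.getElem?_eq_none (by omega)]
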